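-- pv_equiv track=rewrite | github.com/cttibbetts/aoc2020 | 11/main.py | all_adj
-- ===== SOURCE A (Python) =====
-- FLOOR = "."
--
-- def walk(grid, x, y, dx, dy, recurse=False):
--     try:
--         if y + dy == -1 or x + dx == -1:
--             raise IndexError
--         step = grid[y + dy][x + dx]
--         if recurse and step is FLOOR:
--             return walk(grid, x + dx, y + dy, dx, dy, recurse)
--         return step
--     except IndexError:
--         return None
--
-- def all_adj(grid, x, y, recurse=False):
--     adj = [
--         spot
--         for spot in [
--             walk(grid, x, y, -1, -1, recurse),  # ul
--             walk(grid, x, y, 0, -1, recurse),  # u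
--             walk(grid, x, y, 1, -1, recurse),  # ur
--             walk(grid, x, y, -1, 0, recurse),  # l
--             walk(grid, x, y, 1, 0, recurse),  # r
--             walk(grid, x, y, -1, 1, recurse),  # dl
--             walk(grid, x, y, 0, 1, recurse),  # d
--             walk(grid, x, y, 1, 1, recurse),  # dr
--         ]
--         if spot is not None
--     ]
--     return adj
-- ===== SOURCE B (Python) =====
-- FLOOR = "."
--
-- DIRECTIONS = ((-1, -1), (0, -1), (1, -1), (-1, 0), (1, 0), (-1, 1), (0, 1), (1, 1))
--
--
-- def all_adj(grid, x, y, recurse=False):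
--     adj = []
--     for dx, dy in DIRECTIONS:
--         cx, cy = x, y
--         while True:
--             nx, ny = cx + dx, cy + dy
--             if nx == -1 or ny == -1:
--                 break
--             try:
--                 cell = grid[ny][nx]
--             except IndexError:
--                 break
--             if recurse and cell is FLOOR:
--                 cx, cy = nx, ny
--                 continue
--             adj.append(cell)
--             break
--     return adj
-- ===== Notes on version B (the rewrite author's own statement) =====
-- stated objective: simpler
-- what changed: Replaces the recursive walk helper and the comprehension over 8 explicit calls by a single loop over a direction-vector table with an iterative cursor-stepping while loop and an accumulator.
import Mathlib
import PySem

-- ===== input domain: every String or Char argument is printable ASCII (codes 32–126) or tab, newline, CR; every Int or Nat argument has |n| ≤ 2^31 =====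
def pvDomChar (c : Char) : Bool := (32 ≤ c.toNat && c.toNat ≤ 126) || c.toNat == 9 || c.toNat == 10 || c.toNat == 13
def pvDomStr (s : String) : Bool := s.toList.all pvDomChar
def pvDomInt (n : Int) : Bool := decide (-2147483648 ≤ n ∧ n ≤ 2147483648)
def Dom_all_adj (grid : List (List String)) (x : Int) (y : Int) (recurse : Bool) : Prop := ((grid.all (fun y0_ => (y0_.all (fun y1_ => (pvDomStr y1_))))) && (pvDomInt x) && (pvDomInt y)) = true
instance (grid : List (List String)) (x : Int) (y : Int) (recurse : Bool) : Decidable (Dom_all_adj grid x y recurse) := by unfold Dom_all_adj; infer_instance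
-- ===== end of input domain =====

-- B replaces the recursive `walk` helper and the list comprehension over eight explicit
-- calls by a single loop over a direction-vector table with an iterative cursor-stepping
-- inner loop and an accumulator (objective: simpler).


-- ===== PORT A =====
-- Fuel bound for the recursion/iteration: once inside the grid the moving coordinate is
-- monotone and confined, so this many steps always suffice (the Python recursion terminates;
-- fuel only makes the Lean transcription structurally total).
def pvFuel (grid : List (List String)) : Nat :=
  2 * grid.length + 2 * (grid.map List.length).sum + 4

-- walk: literal transcription of A's recursive helper (try/except = pyGet? none;
-- `step is FLOOR` = equality with ".", exact because cells equal to "." are the interned FLOOR).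
def walkA (grid : List (List String)) : Nat → Int → Int → Int → Int → Bool → Option String
  | 0, _, _, _, _, _ => none
  | fuel + 1, x, y, dx, dy, recurse =>
    if y + dy = -1 ∨ x + dx = -1 then none
    else
      match PySem.List.pyGet? grid (y + dy) with
      | none => none
      | some row =>
        match PySem.List.pyGet? row (x + dx) with
        | none => none
        | some step =>
          if recurse && step == "." then
            walkA grid fuel (x + dx) (y + dy) dx dy recurse
          else some step

def all_adj (grid : List (List String)) (x : Int) (y : Int) (recurse : Bool) : List String :=
  ([walkA grid (pvFuel grid) x y (-1) (-1) recurse,  -- ul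
    walkA grid (pvFuel grid) x y 0    (-1) recurse,  -- u
    walkA grid (pvFuel grid) x y 1    (-1) recurse,  -- ur
    walkA grid (pvFuel grid) x y (-1) 0    recurse,  -- l
    walkA grid (pvFuel grid) x y 1    0    recurse,  -- r
    walkA grid (pvFuel grid) x y (-1) 1    recurse,  -- dl
    walkA grid (pvFuel grid) x y 0    1    recurse,  -- d
    walkA grid (pvFuel grid) x y 1    1    recurse   -- dr
   ]).filterMap id

-- ===== PORT B =====
-- scanB: B's inner while loop (cursor stepping); fuel as above makes it structurally total.
def scanB (grid : List (List String)) : Nat → Int → Int → Int → Int → Bool → Option String :=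
  fun fuel cx cy dx dy recurse =>
    match fuel with
    | 0 => none
    | fuel + 1 =>
      let nx := cx + dx
      let ny := cy + dy
      if nx = -1 ∨ ny = -1 then none
      else
        (PySem.List.pyGet? grid ny).bind fun row =>
          (PySem.List.pyGet? row nx).bind fun cell =>
            if recurse && cell == "." then scanB grid fuel nx ny dx dy recurse
            else some cell

def dirsB : List (Int × Int) :=
  [(-1, -1), (0, -1), (1, -1), (-1, 0), (1, 0), (-1, 1), (0, 1), (1, 1)]

def all_adj_alt (grid : List (List String)) (x : Int) (y : Int) (recurse : Bool) : List String :=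
  dirsB.foldl
    (fun adj d =>
      match scanB grid (pvFuel grid) x y d.1 d.2 recurse with
      | some cell => adj ++ [cell]
      | none => adj)
    []

-- ===== PRECONDITION & SPEC =====
def Spec_all_adj (grid : List (List String)) (x : Int) (y : Int) (recurse : Bool) (out : List String) : Prop := out = all_adj_alt grid x y recurse
instance (grid : List (List String)) (x : Int) (y : Int) (recurse : Bool) (out : List String) : Decidable (Spec_all_adj grid x y recurse out) := by unfold Spec_all_adj; infer_instance

-- ===== CLAIM (what is proved, stated in full; the proofs are below) =====
def Claim_equal_all_adj : Prop := ∀ (grid : List (List String)) (x : Int) (y : Int) (recurse : Bool), Dom_all_adj grid x y recurse → Spec_all_adj grid x y recurse (all_adj grid x y recurse)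

-- ===== LEMMAS AND PROOFS =====

-- The iterative stepper computes exactly what A's recursive walk computes.
theorem scanB_eq_walkA (grid : List (List String)) (fuel : Nat) (x y dx dy : Int)
    (recurse : Bool) : scanB grid fuel x y dx dy recurse = walkA grid fuel x y dx dy recurse := by
  induction fuel generalizing x y with
  | zero => simp [scanB, walkA]
  | succ n ih =>
    simp only [scanB, walkA]
    by_cases h : y + dy = -1 ∨ x + dx = -1
    · simp [h, Or.symm h]
    · have h' : ¬ (x + dx = -1 ∨ y + dy = -1) := fun hc => h (Or.symm hc)
      simp only [if_neg h, if_neg h']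
      rcases hg : PySem.List.pyGet? grid (y + dy) with _ | row
      · simp
      · rcases hrow : PySem.List.pyGet? row (x + dx) with _ | cell
        · simp [hrow]
        · simp only [hrow, Option.bind_some]
          by_cases hc : (recurse && cell == ".") = true
          · simp only [if_pos hc, ih]
          · simp only [if_neg hc]

-- ===== VERDICT (by name: the statement is the Claim_ definition above) =====
theorem all_adj_spec : Claim_equal_all_adj := by
  intro grid x y recurse _
  show all_adj grid x y recurse = all_adj_alt grid x y recurse
  unfold all_adj all_adj_alt
  simp only [dirsB, List.foldl_cons, List.foldl_nil, scanB_eq_walkA]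
  generalize walkA grid (pvFuel grid) x y (-1) (-1) recurse = o1
  generalize walkA grid (pvFuel grid) x y 0 (-1) recurse = o2
  generalize walkA grid (pvFuel grid) x y 1 (-1) recurse = o3
  generalize walkA grid (pvFuel grid) x y (-1) 0 recurse = o4
  generalize walkA grid (pvFuel grid) x y 1 0 recurse = o5
  generalize walkA grid (pvFuel grid) x y (-1) 1 recurse = o6
  generalize walkA grid (pvFuel grid) x y 0 1 recurse = o7
  generalize walkA grid (pvFuel grid) x y 1 1 recurse = o8
  cases o1 <;> cases o2 <;> cases o3 <;> cases o4 <;> cases o5 <;> cases o6 <;> cases o7 <;> cases o8 <;>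
    simp [List.filterMap]
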